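-- pv_equiv track=rewrite | github.com/Abercus/devianceminingthesis | DevianceMiningPipeline/declaretemplates_data.py | template_alternate_precedence
-- ===== SOURCE A (Python) =====
-- def template_alternate_precedence(trace, event_set):
--     """
--       precedence(A, B) template indicates that event B
--       should occur only if event A has occurred before.
--
--       Alternate condition:
--       "events must alternate without repetitions of these events in between"
--
--       :param trace:
--       :param event_set:
--       :return:
--       """
--
--     # exactly 2 event
--     assert (len(event_set) == 2)
--
--     event_1 = event_set[0]
--     event_2 = event_set[1]
--     if event_2 in trace:
--         if event_1 in trace:
--             # Go through two lists, one by one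
--             # first events pos must be before 2nd lists first pos etc...
--             # A -> A -> B -> A -> B
--
--             # efficiency check
--             event_1_count = len(trace[event_1])
--             event_2_count = len(trace[event_2])
--
--             # There has to be more or same amount of event A's compared to B's
--             if event_2_count > event_1_count:
--                 return -1, False
--
--             event_1_positions = trace[event_1]
--             event_2_positions = trace[event_2]
--
--             # Go through all event 2's, check that there is respective event 1.
--             # Find largest event 1 position, which is smaller than event 2 position
--
--             # implementation
--             # Check 1-forward, the 1-forward has to be greater than event 2 and current one has to be smaller than event2
--
--             event_1_ind = 0
--             for i, pos2 in enumerate(event_2_positions):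
--                 # find first in event_2_positions, it has to be before next in event_1_positions
--
--                 while True:
--                     if event_1_ind >= len(event_1_positions):
--                         # out of preceding events, but there are still event 2's remaining.
--                         return -1, False
--
--                     next_event_1_pos = None
--
--                     if event_1_ind < len(event_1_positions) - 1:
--                         next_event_1_pos = event_1_positions[event_1_ind + 1]
--
--                     event_1_pos = event_1_positions[event_1_ind]
--
--                     if next_event_1_pos:
--                         if event_1_pos < pos2 and next_event_1_pos > pos2:
--                             # found the largest preceding event
--                             event_1_ind += 1
--                             break
--                         elif event_1_pos > pos2 and next_event_1_pos > pos2: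
--                             # no event larger
--                             return -1, False
--                         else:
--                             event_1_ind += 1
--
--
--                     else:
--                         # if no next event, check if current is smaller
--                         if event_1_pos < pos2:
--                             event_1_ind += 1
--                             break
--                         else:
--                             return -1, False  # since there is no smaller remaining event
--
--             count = len(event_2_positions)
--             return count, False
--
--
--         else:
--             # impossible because there has to be at least one event1 with event2
--             return -1, False
--
--     return 0, True  # todo: vacuity condition!!
-- ===== SOURCE B (Python) =====
-- def template_alternate_precedence(trace, event_set):
--     """Interval view of alternate precedence: some occurrence of the first
--     event must lie before the first occurrence of the second event and
--     strictly between any two consecutive occurrences of it, and the two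
--     events never share a position."""
--     assert (len(event_set) == 2)
--     event_1, event_2 = event_set
--     if event_2 not in trace:
--         return 0, True
--     if event_1 not in trace:
--         return -1, False
--     ones = trace[event_1]
--     twos = trace[event_2]
--     shared = set(ones)
--     prev = None
--     for p in twos:
--         if p in shared:
--             return -1, False
--         if not any((prev is None or prev < x) and x < p for x in ones):
--             return -1, False
--         prev = p
--     return len(twos), False
-- ===== Notes on version B (the rewrite author's own statement) =====
-- stated objective: simpler
-- what changed: Replaces A's one-step-lookahead pointer automaton with direct interval-existence checks (a shared-position set, then for each occurrence of event_2 an existential scan for an event_1 position strictly between it and the previous occurrence); Pre_ restricts the two looked-up position lists to the natural strictly-increasing trace-position form, outside which A's automaton has accidental behaviour (unsorted lists, and a later position 0 read as 'no next event' by its truthiness test).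
-- outside the precondition, e.g. on template_alternate_precedence({'a': [-3, -1, 0, 6, 8], 'b': [1, 3]}, ['a', 'b']): A returns (2, False), B returns (-1, False); on template_alternate_precedence({'x': [4, 8, -1, 3, 6], 'c': [6]}, ['x', 'c']): A returns (1, False), B returns (-1, False)
import Mathlib
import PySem

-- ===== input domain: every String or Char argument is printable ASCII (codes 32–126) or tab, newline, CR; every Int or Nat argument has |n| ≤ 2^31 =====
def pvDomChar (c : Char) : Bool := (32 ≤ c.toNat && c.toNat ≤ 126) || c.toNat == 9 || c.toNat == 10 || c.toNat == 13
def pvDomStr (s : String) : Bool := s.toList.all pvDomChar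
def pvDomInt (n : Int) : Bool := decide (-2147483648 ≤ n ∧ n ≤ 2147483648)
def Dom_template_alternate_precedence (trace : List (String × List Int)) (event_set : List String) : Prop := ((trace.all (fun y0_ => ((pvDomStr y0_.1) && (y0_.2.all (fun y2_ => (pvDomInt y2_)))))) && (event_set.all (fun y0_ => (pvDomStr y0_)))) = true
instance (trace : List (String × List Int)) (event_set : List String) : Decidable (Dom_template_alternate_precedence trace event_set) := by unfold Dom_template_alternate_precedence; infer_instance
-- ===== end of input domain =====

-- ===== PORT A =====
-- B replaces A's one-step-lookahead matching automaton by direct interval-existence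
-- checks over the occurrence positions (objective: simpler); return values proved equal
-- on Pre_ (exactly two events; looked-up position lists in the natural strictly
-- increasing form).

-- inner while-loop of A: advance event_1_ind, return the new index on 'break', none on 'return -1, False'
def tapInner (L1 : List Int) (pos2 : Int) (k : Nat) : Option Nat :=
  if _h : L1.length ≤ k then none
  else
    -- 'if next_event_1_pos:' is truthy iff next exists (event_1_ind < len-1) AND is nonzero
    if k < L1.length - 1 then
      if L1.getD (k+1) 0 ≠ 0 then
        if L1.getD k 0 < pos2 ∧ L1.getD (k+1) 0 > pos2 then some (k+1)
        else if L1.getD k 0 > pos2 ∧ L1.getD (k+1) 0 > pos2 then none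
        else tapInner L1 pos2 (k+1)
      else  -- next_event_1_pos == 0 is falsy: falls to the 'no next event' branch
        if L1.getD k 0 < pos2 then some (k+1) else none
    else  -- no next event: check if current is smaller
      if L1.getD k 0 < pos2 then some (k+1) else none
termination_by L1.length - k

-- outer for-loop of A over event_2_positions
def tapOuter (L1 : List Int) (L2 : List Int) (k : Nat) : Bool :=
  match L2 with
  | [] => true
  | pos2 :: rest =>
    match tapInner L1 pos2 k with
    | none => false
    | some k' => tapOuter L1 rest k'

def template_alternate_precedence (trace : List (String × List Int)) (event_set : List String) : Int × Bool :=
  match (PySem.Dict.mk trace).get? (event_set.getD 1 "") with   -- event_2 in trace?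
  | none => (0, true)
  | some L2 =>
    match (PySem.Dict.mk trace).get? (event_set.getD 0 "") with  -- event_1 in trace?
    | none => (-1, false)
    | some L1 =>
      if (L2.length : Int) > L1.length then (-1, false)
      else if tapOuter L1 L2 0 then ((L2.length : Int), false)
      else (-1, false)

-- ===== PORT B =====
-- Source B's 'any((prev is None or prev < x) and x < p for x in ones)'
def altAny (ones : List Int) (prev : Option Int) (p : Int) : Bool :=
  ones.any (fun x =>
    (match prev with | none => true | some q => decide (q < x)) && decide (x < p))

-- Source B's for-loop over twos, carrying prev
def altCheck (ones : List Int) (shared : PySem.Set Int) (twos : List Int) (prev : Option Int) : Bool :=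
  match twos with
  | [] => true
  | p :: rest =>
    if PySem.Set.contains shared p then false
    else if ! altAny ones prev p then false
    else altCheck ones shared rest (some p)

def template_alternate_precedence_alt (trace : List (String × List Int)) (event_set : List String) : Int × Bool :=
  match (PySem.Dict.mk trace).get? (event_set.getD 1 "") with   -- event_2 in trace?
  | none => (0, true)
  | some twos =>
    match (PySem.Dict.mk trace).get? (event_set.getD 0 "") with  -- event_1 in trace?
    | none => (-1, false)
    | some ones =>
      if altCheck ones (PySem.Set.ofList ones) twos none then ((twos.length : Int), false)
      else (-1, false)

-- ===== PRECONDITION & SPEC =====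
-- Pre_ excludes the inputs where A's 'assert len(event_set) == 2' raises, and — only when both
-- looked-up events are present — restricts their two position lists to the natural domain of
-- occurrence positions in a trace (strictly increasing, and no position 0 after the first entry
-- of event_1's list): outside that form A's pointer automaton has accidental behaviour (it reads
-- a later position 0 as 'no next event' and its lookahead presupposes sorted positions).
def Pre_template_alternate_precedence (trace : List (String × List Int)) (event_set : List String) : Prop :=
  event_set.length = 2 ∧
  ((PySem.Dict.mk trace).contains (event_set.getD 1 "") = true →
   (PySem.Dict.mk trace).contains (event_set.getD 0 "") = true →
   ∀ q ∈ trace,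
     (q.1 = event_set.getD 0 "" → q.2.Pairwise (· < ·) ∧ (0:Int) ∉ q.2.tail) ∧
     (q.1 = event_set.getD 1 "" → q.2.Pairwise (· < ·)))
instance (trace : List (String × List Int)) (event_set : List String) : Decidable (Pre_template_alternate_precedence trace event_set) := by unfold Pre_template_alternate_precedence; infer_instance

def pvWitness_template_alternate_precedence : (List (String × List Int)) × List String :=
  ([("a", [1, 3]), ("b", [2, 5])], ["a", "b"])

def Spec_template_alternate_precedence (trace : List (String × List Int)) (event_set : List String) (out : Int × Bool) : Prop := out = template_alternate_precedence_alt trace event_set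
instance (trace : List (String × List Int)) (event_set : List String) (out : Int × Bool) : Decidable (Spec_template_alternate_precedence trace event_set out) := by unfold Spec_template_alternate_precedence; infer_instance

-- ===== CLAIM (what is proved, stated in full; the proofs are below) =====
def Claim_equal_template_alternate_precedence : Prop := ∀ (trace : List (String × List Int)) (event_set : List String), Dom_template_alternate_precedence trace event_set → Pre_template_alternate_precedence trace event_set → Spec_template_alternate_precedence trace event_set (template_alternate_precedence trace event_set)

-- ===== LEMMAS AND PROOFS =====

-- a successful Dict lookup comes from an entry of the association list
theorem get?_mk_mem (l : List (String × List Int)) (k : String) (v : List Int)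
    (h : (PySem.Dict.mk l).get? k = some v) : (k, v) ∈ l := by
  induction l with
  | nil => simp [PySem.Dict.get?] at h
  | cons hd tl ih =>
    rw [PySem.Dict.get?_mk_cons] at h
    by_cases hk : hd.1 == k
    · rw [if_pos hk] at h
      have h1 : hd.1 = k := by simpa using hk
      have h2 : hd.2 = v := by simpa using h
      have : hd = (k, v) := by
        cases hd
        simp_all
      rw [this]
      exact List.mem_cons_self
    · rw [if_neg hk] at h
      exact List.mem_cons_of_mem _ (ih h)

-- strict monotonicity of getD on a Pairwise (<) list
theorem sortedD (L : List Int) (h : L.Pairwise (· < ·)) {i j : Nat}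
    (hij : i < j) (hj : j < L.length) : L.getD i 0 < L.getD j 0 := by
  rw [List.getD_eq_getElem L 0 (by omega), List.getD_eq_getElem L 0 hj]
  exact List.pairwise_iff_getElem.mp h i j (by omega) hj hij

-- a position after the head is nonzero under the Pre_ condition
theorem tail_ne_zero (L : List Int) (hz : (0:Int) ∉ L.tail) {j : Nat}
    (h1 : 1 ≤ j) (hj : j < L.length) : L.getD j 0 ≠ 0 := by
  intro hc
  apply hz
  rw [List.getD_eq_getElem L 0 hj] at hc
  have : L[j] ∈ L.tail := by
    have : L.tail[j-1]'(by simp [List.length_tail]; omega) ∈ L.tail := List.getElem_mem _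
    simpa [List.getElem_tail, Nat.sub_add_cancel h1] using this
  rwa [hc] at this

-- first index ≥ k whose entry exceeds p (L1.length if none)
def firstGt (L : List Int) (p : Int) (k : Nat) : Nat :=
  if _h : L.length ≤ k then k
  else if p < L.getD k 0 then k else firstGt L p (k+1)
termination_by L.length - k

theorem firstGt_le (L : List Int) (p : Int) (k : Nat) (hk : k ≤ L.length) :
    k ≤ firstGt L p k ∧ firstGt L p k ≤ L.length := by
  rw [firstGt]
  split
  · omega
  · split
    · omega
    · have := firstGt_le L p (k+1) (by omega)
      omega
termination_by L.length - k

theorem firstGt_below (L : List Int) (p : Int) (k : Nat) :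
    ∀ i, k ≤ i → i < firstGt L p k → L.getD i 0 ≤ p := by
  intro i hki hif
  rw [firstGt] at hif
  split at hif
  · omega
  · split at hif
    · omega
    · rcases Nat.eq_or_lt_of_le hki with rfl | hlt
      · omega
      · exact firstGt_below L p (k+1) i (by omega) hif
termination_by L.length - k

theorem firstGt_spec (L : List Int) (p : Int) (k : Nat) :
    firstGt L p k < L.length → p < L.getD (firstGt L p k) 0 := by
  by_cases h1 : L.length ≤ k
  · rw [firstGt, dif_pos h1]
    intro h
    omega
  · by_cases h2 : p < L.getD k 0
    · rw [firstGt, dif_neg h1, if_pos h2]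
      intro _
      exact h2
    · rw [firstGt, dif_neg h1, if_neg h2]
      exact firstGt_spec L p (k+1)
termination_by L.length - k

theorem firstGt_above (L : List Int) (p : Int) (k : Nat) (hs : L.Pairwise (· < ·)) :
    ∀ i, firstGt L p k ≤ i → i < L.length → p < L.getD i 0 := by
  intro i hfi hi
  have key := firstGt_spec L p k (by omega)
  rcases Nat.eq_or_lt_of_le hfi with h | h
  · rw [← h]
    exact key
  · exact lt_trans key (sortedD L hs h hi)

-- elements of L.drop k are at least L.getD k 0 on a sorted list
theorem not_mem_drop (L : List Int) (hs : L.Pairwise (· < ·)) (k : Nat) (hk : k < L.length)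
    (p : Int) (hp : p < L.getD k 0) : p ∉ L.drop k := by
  intro hmem
  rw [List.mem_iff_getElem] at hmem
  obtain ⟨j, hj, hje⟩ := hmem
  rw [List.getElem_drop] at hje
  have hlen : k + j < L.length := by
    have := hj
    simp only [List.length_drop] at this
    omega
  have hle : L.getD k 0 ≤ L.getD (k + j) 0 := by
    rcases Nat.eq_zero_or_pos j with rfl | hj0
    · simp
    · exact le_of_lt (sortedD L hs (by omega) hlen)
  rw [List.getD_eq_getElem L 0 hlen, hje] at hle
  omega

theorem drop_cons_getD (L : List Int) (k : Nat) (hk : k < L.length) :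
    L.drop k = L.getD k 0 :: L.drop (k+1) := by
  rw [List.getD_eq_getElem L 0 hk]
  exact List.drop_eq_getElem_cons hk

-- characterization of A's inner while-loop on a sorted list without later zeros
theorem tapInner_char (L : List Int) (hs : L.Pairwise (· < ·)) (hz : (0:Int) ∉ L.tail)
    (p : Int) (k : Nat) (hk : k < L.length) :
    tapInner L p k =
      (if L.getD k 0 < p ∧ p ∉ L.drop k then some (firstGt L p k) else none) := by
  rw [tapInner, dif_neg (by omega : ¬ L.length ≤ k)]
  by_cases hlast : k < L.length - 1
  · rw [if_pos hlast]
    have hnz : L.getD (k+1) 0 ≠ 0 := tail_ne_zero L hz (by omega) (by omega)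
    rw [if_pos hnz]
    have hadj : L.getD k 0 < L.getD (k+1) 0 := sortedD L hs (by omega) (by omega)
    by_cases hacc : L.getD k 0 < p ∧ L.getD (k+1) 0 > p
    · rw [if_pos hacc]
      have hnd : p ∉ L.drop k := by
        rw [drop_cons_getD L k hk]
        intro hmem
        rcases List.mem_cons.mp hmem with h | h
        · omega
        · exact not_mem_drop L hs (k+1) (by omega) p hacc.2 h
      rw [if_pos ⟨hacc.1, hnd⟩]
      have : firstGt L p k = k + 1 := by
        rw [firstGt, dif_neg (by omega : ¬ L.length ≤ k),
            if_neg (by omega : ¬ p < L.getD k 0), firstGt,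
            dif_neg (by omega : ¬ L.length ≤ k + 1), if_pos hacc.2]
      rw [this]
    · by_cases hrej : L.getD k 0 > p ∧ L.getD (k+1) 0 > p
      · rw [if_neg hacc, if_pos hrej, if_neg (by omega : ¬ (L.getD k 0 < p ∧ p ∉ L.drop k))]
      · rw [if_neg hacc, if_neg hrej,
            tapInner_char L hs hz p (k+1) (by omega)]
        by_cases hcp : L.getD (k+1) 0 ≤ p
        · have hklt : L.getD k 0 < p := by omega
          have hne : p ≠ L.getD k 0 := by omega
          by_cases heq : L.getD (k+1) 0 = p
          · have hmem : p ∈ L.drop k := by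
              rw [drop_cons_getD L k hk, drop_cons_getD L (k+1) (by omega), heq]
              exact List.mem_cons_of_mem _ List.mem_cons_self
            rw [if_neg (by omega : ¬ (L.getD (k+1) 0 < p ∧ p ∉ L.drop (k+1))),
                if_neg (by simp [hmem] : ¬ (L.getD k 0 < p ∧ p ∉ L.drop k))]
          · have hlt1 : L.getD (k+1) 0 < p := by omega
            have hmemiff : p ∉ L.drop k ↔ p ∉ L.drop (k+1) := by
              rw [drop_cons_getD L k hk]
              constructor
              · intro h hm
                exact h (List.mem_cons_of_mem _ hm)
              · intro h hm
                rcases List.mem_cons.mp hm with h' | h'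
                · exact hne h'
                · exact h h' 
            have hfg : firstGt L p k = firstGt L p (k+1) := by
              rw [firstGt, dif_neg (by omega : ¬ L.length ≤ k),
                  if_neg (by omega : ¬ p < L.getD k 0)]
            by_cases hm : p ∈ L.drop (k+1)
            · rw [if_neg (by simp [hm] : ¬ (L.getD (k+1) 0 < p ∧ p ∉ L.drop (k+1))),
                  if_neg (fun hcon => (hmemiff.mp hcon.2) hm)]
            · rw [if_pos ⟨hlt1, hm⟩, if_pos ⟨hklt, hmemiff.mpr hm⟩, hfg]
        · have hkp : L.getD k 0 = p := by
            rcases not_and_or.mp hacc with h | h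
            · rcases not_and_or.mp hrej with h' | h' <;> omega
            · omega
          rw [if_neg (by omega : ¬ (L.getD (k+1) 0 < p ∧ p ∉ L.drop (k+1)))]
          have hmem : p ∈ L.drop k := by
            rw [drop_cons_getD L k hk, hkp]
            exact List.mem_cons_self
          rw [if_neg (by simp [hmem] : ¬ (L.getD k 0 < p ∧ p ∉ L.drop k))]
  · rw [if_neg hlast]
    have hdrop : L.drop k = [L.getD k 0] := by
      rw [drop_cons_getD L k hk, List.drop_eq_nil_of_le (by omega)]
    by_cases hlt : L.getD k 0 < p
    · rw [if_pos hlt]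
      have : firstGt L p k = k + 1 := by
        rw [firstGt, dif_neg (by omega : ¬ L.length ≤ k),
            if_neg (by omega : ¬ p < L.getD k 0), firstGt,
            dif_pos (by omega : L.length ≤ k + 1)]
      have hnd : p ∉ L.drop k := by
        rw [hdrop]
        intro hm
        rw [List.mem_singleton] at hm
        omega
      rw [if_pos ⟨hlt, hnd⟩, this]
    · rw [if_neg hlt, if_neg (fun hcon => hlt hcon.1)]
termination_by L.length - k

theorem tapInner_some_bounds (L : List Int) (p : Int) (k t : Nat)
    (h : tapInner L p k = some t) : k < t ∧ t ≤ L.length := by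
  rw [tapInner] at h
  split at h
  · exact absurd h (by simp)
  · split at h
    · split at h
      · split at h
        · cases h; omega
        · split at h
          · exact absurd h (by simp)
          · have := tapInner_some_bounds L p (k+1) t h
            omega
      · split at h
        · cases h; omega
        · exact absurd h (by simp)
    · split at h
      · cases h; omega
      · exact absurd h (by simp)
termination_by L.length - k

theorem tapOuter_len (L1 L2 : List Int) (k : Nat) (h : tapOuter L1 L2 k = true) :
    L2.length ≤ L1.length - k := by
  induction L2 generalizing k with
  | nil => simp
  | cons p rest ih =>
    rw [tapOuter] at h
    cases hti : tapInner L1 p k with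
    | none => rw [hti] at h; exact absurd h (by simp)
    | some t =>
      rw [hti] at h
      have h1 := tapInner_some_bounds L1 p k t hti
      have h2 := ih t h
      simp only [List.length_cons]
      omega

-- invariant carried through the loops: prev is the last matched position of event_2,
-- the first k entries of L1 are ≤ prev, the rest are > prev, and all remaining
-- positions of event_2 are > prev
def LoopInv (L1 L2 : List Int) (k : Nat) (prev : Option Int) : Prop :=
  match prev with
  | none => k = 0
  | some q => (∀ i, i < k → L1.getD i 0 ≤ q) ∧
              (∀ i, k ≤ i → i < L1.length → q < L1.getD i 0) ∧
              (∀ p ∈ L2, q < p)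

-- an element of L1 taken from an index ≥ k
theorem mem_drop_of_getElem (L : List Int) (i k : Nat) (hki : k ≤ i) (hi : i < L.length) :
    L.getD i 0 ∈ L.drop k := by
  rw [List.getD_eq_getElem L 0 hi, List.mem_iff_getElem]
  refine ⟨i - k, by simp [List.length_drop]; omega, ?_⟩
  rw [List.getElem_drop]
  congr 1
  omega

theorem outer_eq (L1 : List Int) (hs1 : L1.Pairwise (· < ·)) (hz : (0:Int) ∉ L1.tail)
    (L2 : List Int) :
    ∀ (k : Nat) (prev : Option Int),
      k ≤ L1.length → L2.Pairwise (· < ·) → LoopInv L1 L2 k prev →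
      tapOuter L1 L2 k = altCheck L1 (PySem.Set.ofList L1) L2 prev := by
  induction L2 with
  | nil => intro k prev _ _ _; rfl
  | cons p rest ih =>
    intro k prev hk hL2 hinv
    have hqp : ∀ q, prev = some q → q < p := by
      intro q hq
      rw [hq] at hinv
      exact hinv.2.2 p List.mem_cons_self
    by_cases hkn : L1.length ≤ k
    · -- pointer exhausted: both sides fail
      rw [tapOuter, tapInner, dif_pos hkn]
      have hfact : ∀ x ∈ L1, ∃ q, prev = some q ∧ x ≤ q := by
        intro x hx
        cases prev with
        | none =>
          have : k = 0 := hinv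
          have : L1 = [] := List.eq_nil_of_length_eq_zero (by omega)
          simp [this] at hx
        | some q =>
          obtain ⟨i, hi, rfl⟩ := List.mem_iff_getElem.mp hx
          refine ⟨q, rfl, ?_⟩
          rw [← List.getD_eq_getElem L1 0 hi]
          exact hinv.1 i (by omega)
      have hcont : PySem.Set.contains (PySem.Set.ofList L1) p = false := by
        rw [Bool.eq_false_iff]
        intro hc
        have hp := (PySem.Set.mem_ofList _ _).mp ((PySem.Set.contains_iff _ _).mp hc)
        obtain ⟨q, hq, hle⟩ := hfact p hp
        exact absurd (hqp q hq) (by omega)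
      have hany : altAny L1 prev p = false := by
        rw [Bool.eq_false_iff]
        intro hc
        obtain ⟨x, hx, hxp⟩ := List.any_eq_true.mp hc
        obtain ⟨q, hq, hle⟩ := hfact x hx
        rw [hq] at hxp
        simp only [Bool.and_eq_true, decide_eq_true_eq] at hxp
        omega
      rw [altCheck, hcont, if_neg (by simp), hany]
      simp
    · -- pointer inside L1
      have hklt : k < L1.length := by omega
      rw [tapOuter, tapInner_char L1 hs1 hz p k hklt]
      -- the prefix before k cannot witness anything about p
      have hpre_le : ∀ i, i < k → ∃ q, prev = some q ∧ L1.getD i 0 ≤ q := by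
        intro i hi
        cases prev with
        | none =>
          have h0 : k = 0 := hinv
          omega
        | some q => exact ⟨q, rfl, hinv.1 i hi⟩
      have hmem_iff : p ∈ L1 ↔ p ∈ L1.drop k := by
        constructor
        · intro hp
          obtain ⟨i, hi, rfl⟩ := List.mem_iff_getElem.mp hp
          rcases Nat.lt_or_ge i k with hik | hik
          · obtain ⟨q, hq, hle⟩ := hpre_le i hik
            have := hqp q hq
            rw [List.getD_eq_getElem L1 0 hi] at hle
            omega
          · rw [← List.getD_eq_getElem L1 0 hi]
            exact mem_drop_of_getElem L1 i k hik hi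
        · exact List.mem_of_mem_drop
      have hany_iff : altAny L1 prev p = true ↔ L1.getD k 0 < p := by
        constructor
        · intro hc
          obtain ⟨x, hx, hxp⟩ := List.any_eq_true.mp hc
          simp only [Bool.and_eq_true, decide_eq_true_eq] at hxp
          obtain ⟨i, hi, rfl⟩ := List.mem_iff_getElem.mp hx
          rcases Nat.lt_or_ge i k with hik | hik
          · obtain ⟨q, hq, hle⟩ := hpre_le i hik
            rw [hq] at hxp
            simp only [decide_eq_true_eq] at hxp
            rw [List.getD_eq_getElem L1 0 hi] at hle
            omega
          · have hmono : L1.getD k 0 ≤ L1.getD i 0 := by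
              rcases Nat.eq_or_lt_of_le hik with rfl | hlt
              · exact le_refl _
              · exact le_of_lt (sortedD L1 hs1 hlt hi)
            rw [List.getD_eq_getElem L1 0 hi] at hmono
            omega
        · intro hlt
          apply List.any_eq_true.mpr
          refine ⟨L1.getD k 0, by
            rw [List.getD_eq_getElem L1 0 hklt]; exact List.getElem_mem _, ?_⟩
          simp only [Bool.and_eq_true, decide_eq_true_eq]
          refine ⟨?_, hlt⟩
          cases prev with
          | none => simp
          | some q =>
            simp only [decide_eq_true_eq]
            exact hinv.2.1 k (le_refl k) hklt
      by_cases hcond : L1.getD k 0 < p ∧ p ∉ L1.drop k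
      · rw [if_pos hcond]
        have hcont : PySem.Set.contains (PySem.Set.ofList L1) p = false := by
          rw [Bool.eq_false_iff]
          intro hc
          exact hcond.2 (hmem_iff.mp ((PySem.Set.mem_ofList _ _).mp ((PySem.Set.contains_iff _ _).mp hc)))
        have hany : altAny L1 prev p = true := hany_iff.mpr hcond.1
        rw [altCheck, hcont, if_neg (by simp), hany]
        simp only [Bool.not_true, if_neg (by simp : ¬ (false = true))]
        -- recurse with the new pointer and prev = p
        have hfg := firstGt_le L1 p k (by omega)
        apply ih (firstGt L1 p k) (some p) hfg.2 (List.Pairwise.of_cons hL2)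
        refine ⟨?_, ?_, ?_⟩
        · intro i hi
          rcases Nat.lt_or_ge i k with hik | hik
          · obtain ⟨q, hq, hle⟩ := hpre_le i hik
            have := hqp q hq
            omega
          · exact firstGt_below L1 p k i hik hi
        · intro i hfi hi
          exact firstGt_above L1 p k hs1 i hfi hi
        · exact (List.pairwise_cons.mp hL2).1
      · rw [if_neg hcond]
        by_cases hpmem : p ∈ L1
        · have hcont : PySem.Set.contains (PySem.Set.ofList L1) p = true :=
            (PySem.Set.contains_iff _ _).mpr ((PySem.Set.mem_ofList _ _).mpr hpmem)
          rw [altCheck, hcont]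
          simp
        · have hnd : p ∉ L1.drop k := fun hm => hpmem (hmem_iff.mpr hm)
          have hnlt : ¬ L1.getD k 0 < p := fun hlt => hcond ⟨hlt, hnd⟩
          have hcont : PySem.Set.contains (PySem.Set.ofList L1) p = false := by
            rw [Bool.eq_false_iff]
            intro hc
            exact hpmem ((PySem.Set.mem_ofList _ _).mp ((PySem.Set.contains_iff _ _).mp hc))
          have hany : altAny L1 prev p = false := by
            rw [Bool.eq_false_iff]
            intro hc
            exact hnlt (hany_iff.mp hc)
          rw [altCheck, hcont, if_neg (by simp), hany]
          simp

-- ===== VERDICT (by name: the statement is the Claim_ definition above) =====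
theorem template_alternate_precedence_spec : Claim_equal_template_alternate_precedence := by
  intro trace event_set _hdom hpre
  obtain ⟨_hlen, hcond⟩ := hpre
  unfold Spec_template_alternate_precedence template_alternate_precedence template_alternate_precedence_alt
  cases h2 : (PySem.Dict.mk trace).get? (event_set.getD 1 "") with
  | none => rfl
  | some L2 =>
    cases h1 : (PySem.Dict.mk trace).get? (event_set.getD 0 "") with
    | none => rfl
    | some L1 =>
      have hc2 : (PySem.Dict.mk trace).contains (event_set.getD 1 "") = true := by
        rw [PySem.Dict.contains_eq_isSome_get?, h2]
        rfl
      have hc1 : (PySem.Dict.mk trace).contains (event_set.getD 0 "") = true := by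
        rw [PySem.Dict.contains_eq_isSome_get?, h1]
        rfl
      have hprops := hcond hc2 hc1
      have hm1 := get?_mk_mem trace _ L1 h1
      have hm2 := get?_mk_mem trace _ L2 h2
      have hp1 := (hprops _ hm1).1 rfl
      have hp2 := (hprops _ hm2).2 rfl
      have heq := outer_eq L1 hp1.1 hp1.2 L2 0 none (by omega) hp2 rfl
      simp only []
      by_cases hg : (L2.length : Int) > (L1.length : Int)
      · rw [if_pos hg]
        have hfail : altCheck L1 (PySem.Set.ofList L1) L2 none = false := by
          rw [← heq, Bool.eq_false_iff]
          intro ht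
          have := tapOuter_len L1 L2 0 ht
          omega
        rw [hfail]
        simp
      · rw [if_neg hg, heq]
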